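-- pv_equiv track=rewrite | github.com/zhixingheyier/MERCATOR | 4_workflow/AG_construction/Code/path_repair_utils.py | _get_last_interaction_time
-- ===== SOURCE A (Python) =====
-- def _get_last_interaction_time(entity, stage_edges, time_limit):
--     """获取实体在time_limit之前最近一次交互的时间"""
--     last_time = -1
--     for i, edge in enumerate(stage_edges):
--         if i >= time_limit:  # 超过时间限制
--             break
--         if edge[0] == entity or edge[2] == entity:
--             last_time = i
--     return last_time
-- ===== SOURCE B (Python) =====
-- def _get_last_interaction_time(entity, stage_edges, time_limit):
--     """获取实体在time_limit之前最近一次交互的时间"""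
--     upper = min(time_limit, len(stage_edges))
--     for i in range(upper - 1, -1, -1):
--         edge = stage_edges[i]
--         if edge[0] == entity or edge[2] == entity:
--             return i
--     return -1
-- ===== Notes on version B (the rewrite author's own statement) =====
-- stated objective: alternative
-- what changed: Replaces the forward scan that accumulates the last matching index with a reverse scan from min(time_limit, len(stage_edges))-1 that returns the first matching index immediately.
import Mathlib
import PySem

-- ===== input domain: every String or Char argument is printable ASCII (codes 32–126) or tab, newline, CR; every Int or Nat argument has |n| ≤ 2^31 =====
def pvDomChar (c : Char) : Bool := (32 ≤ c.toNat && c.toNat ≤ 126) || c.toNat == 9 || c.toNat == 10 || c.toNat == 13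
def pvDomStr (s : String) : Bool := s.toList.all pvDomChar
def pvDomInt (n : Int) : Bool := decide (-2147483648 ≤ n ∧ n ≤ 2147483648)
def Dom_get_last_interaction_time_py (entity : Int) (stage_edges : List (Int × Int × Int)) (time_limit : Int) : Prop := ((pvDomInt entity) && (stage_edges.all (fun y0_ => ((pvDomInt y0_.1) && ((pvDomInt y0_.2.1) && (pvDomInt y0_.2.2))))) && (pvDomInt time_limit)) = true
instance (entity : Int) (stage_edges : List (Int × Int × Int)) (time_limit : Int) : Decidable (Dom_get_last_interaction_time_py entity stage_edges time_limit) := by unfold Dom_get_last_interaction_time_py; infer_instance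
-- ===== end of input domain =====

-- B replaces A's forward accumulate-last scan with a reverse early-return scan from min(time_limit, len)-1 (alternative decomposition, same cost).


-- ===== PORT A =====
-- Port of A: forward scan over enumerate(stage_edges) with break at i >= time_limit,
-- accumulating the last matching index.
def aGo (entity : Int) (time_limit : Int) : List (Int × Int × Int) → Nat → Int → Int
  | [], _, last_time => last_time
  | edge :: rest, i, last_time =>
    if (i : Int) ≥ time_limit then last_time
    else aGo entity time_limit rest (i + 1)
      (if edge.1 = entity ∨ edge.2.2 = entity then (i : Int) else last_time)

def get_last_interaction_time_py (entity : Int) (stage_edges : List (Int × Int × Int)) (time_limit : Int) : Int :=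
  aGo entity time_limit stage_edges 0 (-1)

-- ===== PORT B =====
-- Port of B: reverse scan from upper-1 down to 0, returning the first matching index.
-- altGo entity edges k plays range(k-1, -1, -1): it inspects index k-1 first.
def altGo (entity : Int) (stage_edges : List (Int × Int × Int)) : Nat → Int
  | 0 => -1
  | k + 1 =>
    match stage_edges[k]? with
    | some edge =>
      if edge.1 = entity ∨ edge.2.2 = entity then (k : Int)
      else altGo entity stage_edges k
    | none => altGo entity stage_edges k

def get_last_interaction_time_py_alt (entity : Int) (stage_edges : List (Int × Int × Int)) (time_limit : Int) : Int :=
  altGo entity stage_edges (min time_limit (stage_edges.length : Int)).toNat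

-- ===== PRECONDITION & SPEC =====
def Spec_get_last_interaction_time_py (entity : Int) (stage_edges : List (Int × Int × Int)) (time_limit : Int) (out : Int) : Prop := out = get_last_interaction_time_py_alt entity stage_edges time_limit
instance (entity : Int) (stage_edges : List (Int × Int × Int)) (time_limit : Int) (out : Int) : Decidable (Spec_get_last_interaction_time_py entity stage_edges time_limit out) := by unfold Spec_get_last_interaction_time_py; infer_instance

-- ===== CLAIM (what is proved, stated in full; the proofs are below) =====
def Claim_equal_get_last_interaction_time_py : Prop := ∀ (entity : Int) (stage_edges : List (Int × Int × Int)) (time_limit : Int), Dom_get_last_interaction_time_py entity stage_edges time_limit → Spec_get_last_interaction_time_py entity stage_edges time_limit (get_last_interaction_time_py entity stage_edges time_limit)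

-- ===== LEMMAS AND PROOFS =====

-- fwd: the time-limit-free forward accumulate (the common semantics both ports reduce to)
def fwd (entity : Int) : List (Int × Int × Int) → Nat → Int → Int
  | [], _, last_time => last_time
  | edge :: rest, i, last_time =>
    fwd entity rest (i + 1)
      (if edge.1 = entity ∨ edge.2.2 = entity then (i : Int) else last_time)

theorem aGo_eq_fwd (entity tl : Int) :
    ∀ (l : List (Int × Int × Int)) (i : Nat) (last : Int),
      aGo entity tl l i last = fwd entity (l.take (tl - i).toNat) i last := by
  intro l
  induction l with
  | nil => intro i last; simp [aGo, fwd]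
  | cons e rest ih =>
    intro i last
    by_cases h : (i : Int) ≥ tl
    · have h0 : (tl - i).toNat = 0 := by omega
      simp [aGo, h, h0, fwd]
    · have h1 : (tl - i).toNat = (tl - ((i + 1 : Nat) : Int)).toNat + 1 := by push_cast; omega
      simp [aGo, h, h1, fwd, ih]

theorem fwd_append_singleton (entity : Int) (e : Int × Int × Int) :
    ∀ (l : List (Int × Int × Int)) (i : Nat) (last : Int),
      fwd entity (l ++ [e]) i last =
        if e.1 = entity ∨ e.2.2 = entity then ((i + l.length : Nat) : Int)
        else fwd entity l i last := by
  intro l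
  induction l with
  | nil => intro i last; simp [fwd]
  | cons x rest ih =>
    intro i last
    have hlen : i + (x :: rest).length = (i + 1) + rest.length := by simp; omega
    simp only [List.cons_append, fwd, ih, hlen]

theorem altGo_eq_fwd (entity : Int) (l : List (Int × Int × Int)) :
    ∀ (m : Nat), m ≤ l.length → altGo entity l m = fwd entity (l.take m) 0 (-1) := by
  intro m
  induction m with
  | zero => intro _; simp [altGo, fwd]
  | succ k ih =>
    intro hk
    have hlt : k < l.length := by omega
    have hget : l[k]? = some l[k] := List.getElem?_eq_getElem hlt
    have htake : l.take (k + 1) = l.take k ++ [l[k]] := by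
      rw [List.take_add_one, List.getElem?_eq_getElem hlt]; rfl
    have hlen : (l.take k).length = k := by simp; omega
    rw [htake, fwd_append_singleton, hlen]
    simp only [altGo, hget]
    rw [ih (by omega)]
    split <;> simp

-- ===== VERDICT (by name: the statement is the Claim_ definition above) =====
theorem get_last_interaction_time_py_spec : Claim_equal_get_last_interaction_time_py := by
  intro entity stage_edges time_limit _
  unfold Spec_get_last_interaction_time_py
  unfold get_last_interaction_time_py get_last_interaction_time_py_alt
  rw [aGo_eq_fwd, altGo_eq_fwd _ _ _ (by omega)]
  have h : stage_edges.take (time_limit - ((0 : Nat) : Int)).toNat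
      = stage_edges.take (min time_limit (stage_edges.length : Int)).toNat := by
    rw [List.take_eq_take_iff]; omega
  rw [h]
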